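-- pv_equiv track=rewrite | github.com/HeinleinSupport/checkMK | cmk/legacy_checks/rstcli.py | parse_rstcli_disks
-- ===== SOURCE A (Python) =====
-- def parse_rstcli_disks(rows: list[list[str]]) -> list[dict[str, str]]:
--     disks: list[dict[str, str]] = []
--     current_disk: dict[str, str] = {}
--
--     for row in rows:
--         if row[0] == "ID":
--             current_disk = {}
--             disks.append(current_disk)
--
--         current_disk[row[0]] = row[1].strip()
--
--     return disks
-- ===== SOURCE B (Python) =====
-- def parse_rstcli_disks(rows: list[list[str]]) -> list[dict[str, str]]:
--     # boundary indices: rows starting a new disk; rows before the first "ID" form no disk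
--     bounds = [i for i, row in enumerate(rows) if row[0] == "ID"] + [len(rows)]
--     return [
--         {r[0]: r[1].strip() for r in rows[b:e]}
--         for b, e in zip(bounds, bounds[1:])
--     ]
-- ===== Notes on version B (the rewrite author's own statement) =====
-- stated objective: alternative
-- what changed: Replaces A's single pass that mutates a shared current-disk dict aliased into the result list by a two-phase index/slice decomposition: collect the boundary indices of 'ID' rows, then build each disk dict independently from the slice between consecutive boundaries.
import Mathlib
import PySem

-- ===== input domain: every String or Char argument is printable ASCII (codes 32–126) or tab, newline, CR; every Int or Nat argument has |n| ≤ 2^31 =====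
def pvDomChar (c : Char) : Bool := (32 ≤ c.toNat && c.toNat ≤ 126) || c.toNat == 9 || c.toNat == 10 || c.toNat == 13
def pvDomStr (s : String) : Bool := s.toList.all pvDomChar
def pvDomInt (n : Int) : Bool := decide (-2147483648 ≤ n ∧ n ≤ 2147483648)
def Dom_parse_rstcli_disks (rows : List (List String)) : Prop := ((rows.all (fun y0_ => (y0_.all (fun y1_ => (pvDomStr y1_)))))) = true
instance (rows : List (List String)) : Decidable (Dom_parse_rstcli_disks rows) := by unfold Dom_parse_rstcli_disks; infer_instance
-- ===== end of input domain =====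

-- B replaces A's single mutating pass by an index/slice decomposition (collect 'ID' boundaries, then
-- build each disk dict from the slice between consecutive boundaries); same cost, different structure.
-- A mutates no argument; the equivalence is about the return value.

-- ===== PORT A =====
-- A appends the live `current_disk` dict into `disks` and keeps mutating it; modelled by keeping the
-- finished dicts, the live dict `cur`, and a flag `started` saying whether `cur` is an element of `disks`.
def pvAGo : List (List String) → List (PySem.Dict String String) → PySem.Dict String String → Bool →
    List (PySem.Dict String String)
  | [], disks, cur, started => if started then disks ++ [cur] else disks
  | r :: rs, disks, cur, started =>
      if r.headD "" == "ID" then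
        pvAGo rs (if started then disks ++ [cur] else disks)
          (PySem.Dict.insert PySem.Dict.empty (r.headD "") (PySem.Str.strip (r.getD 1 ""))) true
      else
        pvAGo rs disks (PySem.Dict.insert cur (r.headD "") (PySem.Str.strip (r.getD 1 ""))) started

def parse_rstcli_disks (rows : List (List String)) : List (List (String × String)) :=
  (pvAGo rows [] PySem.Dict.empty false).map (·.items)

-- ===== PORT B =====
-- the dict comprehension {r[0]: r[1].strip() for r in chunk}
def pvBChunk (chunk : List (List String)) : PySem.Dict String String :=
  chunk.foldl (fun d r => PySem.Dict.insert d (r.headD "") (PySem.Str.strip (r.getD 1 ""))) PySem.Dict.empty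

def pvBounds (rows : List (List String)) : List Int :=
  ((PySem.List.enumerate rows).filter (fun p => p.2.headD "" == "ID")).map (·.1) ++ [(rows.length : Int)]

def parse_rstcli_disks_alt (rows : List (List String)) : List (List (String × String)) :=
  (((pvBounds rows).zip (pvBounds rows).tail).map
    (fun be => pvBChunk (PySem.List.slice rows (some be.1) (some be.2)))).map (·.items)

-- ===== PRECONDITION & SPEC =====
-- A does row[0] and row[1] on every row: it raises IndexError on any row with fewer than 2 entries.
def Pre_parse_rstcli_disks (rows : List (List String)) : Prop := ∀ r ∈ rows, 2 ≤ r.length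
instance (rows : List (List String)) : Decidable (Pre_parse_rstcli_disks rows) := by
  unfold Pre_parse_rstcli_disks; infer_instance

def pvWitness_parse_rstcli_disks : List (List String) :=
  [["junk", "x"], ["ID", " 0/0 "], ["Status", " Ok"], ["ID", "0/1"], ["Size", "931 GB "]]

def Spec_parse_rstcli_disks (rows : List (List String)) (out : List (List (String × String))) : Prop := out = parse_rstcli_disks_alt rows
instance (rows : List (List String)) (out : List (List (String × String))) : Decidable (Spec_parse_rstcli_disks rows out) := by unfold Spec_parse_rstcli_disks; infer_instance

-- ===== CLAIM (what is proved, stated in full; the proofs are below) =====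
def Claim_equal_parse_rstcli_disks : Prop := ∀ (rows : List (List String)), Dom_parse_rstcli_disks rows → Pre_parse_rstcli_disks rows → Spec_parse_rstcli_disks rows (parse_rstcli_disks rows)

-- ===== LEMMAS AND PROOFS =====

def pvIsID (r : List String) : Bool := r.headD "" == "ID"

def pvIdE (s : Int) (xs : List (List String)) : List Int :=
  ((PySem.List.enumerate xs s).filter (fun p => p.2.headD "" == "ID")).map (·.1)

theorem pvIdE_nil (s : Int) : pvIdE s [] = [] := by
  simp [pvIdE, PySem.List.enumerate_nil]

theorem pvIdE_cons (s : Int) (x : List String) (xs : List (List String)) :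
    pvIdE s (x :: xs) = (if pvIsID x then [s] else []) ++ pvIdE (s+1) xs := by
  simp only [pvIdE, PySem.List.enumerate_cons, List.filter_cons, pvIsID]
  split <;> simp_all

theorem pvIdE_shift (xs : List (List String)) (s : Int) :
    pvIdE s xs = (pvIdE 0 xs).map (· + s) := by
  induction xs generalizing s with
  | nil => simp [pvIdE_nil]
  | cons x xs ih =>
      rw [pvIdE_cons, pvIdE_cons]
      rw [ih (s+1), show (0:Int)+1 = 1 from rfl, ih 1]
      simp only [List.map_append, List.map_map]
      congr 1
      · split <;> simp
      · apply List.map_congr_left; intro b _; simp [Function.comp]; ring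


theorem pvBounds_eq (rows : List (List String)) :
    pvBounds rows = pvIdE 0 rows ++ [(rows.length : Int)] := rfl

theorem pvBounds_cons_not (r : List String) (rs : List (List String)) (h : pvIsID r = false) :
    pvBounds (r :: rs) = (pvBounds rs).map (· + 1) := by
  rw [pvBounds_eq, pvBounds_eq, pvIdE_cons, h, pvIdE_shift]
  simp

theorem pvBounds_cons_id (r : List String) (rs : List (List String)) (h : pvIsID r = true) :
    pvBounds (r :: rs) = 0 :: (pvBounds rs).map (· + 1) := by
  rw [pvBounds_eq, pvBounds_eq, pvIdE_cons, h, pvIdE_shift]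
  simp

theorem pvBounds_nonneg (rs : List (List String)) (b : Int) (hb : b ∈ pvBounds rs) : 0 ≤ b := by
  induction rs generalizing b with
  | nil => simp [pvBounds_eq, pvIdE_nil] at hb; omega
  | cons r rs ih =>
      by_cases h : pvIsID r
      · rw [pvBounds_cons_id r rs h] at hb
        rcases List.mem_cons.mp hb with h0 | hm
        · omega
        · obtain ⟨c, hc, rfl⟩ := List.mem_map.mp hm
          have := ih c hc; omega
      · rw [pvBounds_cons_not r rs (by simpa using h)] at hb
        obtain ⟨c, hc, rfl⟩ := List.mem_map.mp hb
        have := ih c hc; omega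

theorem pvBounds_head (rs : List (List String)) :
    ∃ bs, pvBounds rs = ((rs.takeWhile (fun x => !pvIsID x)).length : Int) :: bs := by
  induction rs with
  | nil => exact ⟨[], by simp [pvBounds_eq, pvIdE_nil]⟩
  | cons r rs ih =>
      by_cases h : pvIsID r
      · exact ⟨(pvBounds rs).map (· + 1), by rw [pvBounds_cons_id r rs h]; simp [h]⟩
      · obtain ⟨bs, hbs⟩ := ih
        refine ⟨bs.map (· + 1), ?_⟩
        rw [pvBounds_cons_not r rs (by simpa using h), hbs]
        simp [h]

theorem pvTake_takeWhile (p : List String → Bool) (l : List (List String)) :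
    l.take (l.takeWhile p).length = l.takeWhile p := by
  obtain ⟨t, ht⟩ := List.takeWhile_prefix (l := l) p
  calc l.take (l.takeWhile p).length = (l.takeWhile p ++ t).take (l.takeWhile p).length := by rw [ht]
    _ = l.takeWhile p := List.take_left

theorem pvSlice_succ (x : List String) (xs : List (List String)) (b e : Int)
    (hb : 0 ≤ b) (he : 0 ≤ e) :
    PySem.List.slice (x :: xs) (some (b+1)) (some (e+1)) = PySem.List.slice xs (some b) (some e) := by
  rw [PySem.List.slice_toNat _ (by omega) (by omega), PySem.List.slice_toNat _ hb he]
  have hb1 : (b+1).toNat = b.toNat + 1 := by omega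
  have he1 : (e+1).toNat = e.toNat + 1 := by omega
  rw [hb1, he1]
  simp [Nat.succ_sub_succ]

def pvChunksB (rows : List (List String)) : List (List (List String)) :=
  ((pvBounds rows).zip (pvBounds rows).tail).map
    (fun be => PySem.List.slice rows (some be.1) (some be.2))

theorem pvChunksB_nil : pvChunksB [] = [] := by
  simp [pvChunksB, pvBounds_eq, pvIdE_nil]

theorem pvZipTail_map (m : List Int) (f : Int → Int) :
    ((m.map f).zip (m.map f).tail) = (m.zip m.tail).map (fun p => (f p.1, f p.2)) := by
  rw [← List.map_tail, List.zip_map]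
  rfl

theorem pvChunksB_cons_not (r : List String) (rs : List (List String)) (h : pvIsID r = false) :
    pvChunksB (r :: rs) = pvChunksB rs := by
  rw [pvChunksB, pvChunksB, pvBounds_cons_not r rs h, pvZipTail_map]
  rw [List.map_map]
  apply List.map_congr_left
  intro be hbe
  have h1 : be.1 ∈ pvBounds rs := (List.of_mem_zip hbe).1
  have h2 : be.2 ∈ (pvBounds rs).tail := (List.of_mem_zip hbe).2
  have hb1 := pvBounds_nonneg rs be.1 h1
  have hb2 := pvBounds_nonneg rs be.2 (List.mem_of_mem_tail h2)
  simp [Function.comp, pvSlice_succ r rs be.1 be.2 hb1 hb2]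

theorem pvChunksB_cons_id (r : List String) (rs : List (List String)) (h : pvIsID r = true) :
    pvChunksB (r :: rs) = (r :: rs.takeWhile (fun x => !pvIsID x)) :: pvChunksB rs := by
  obtain ⟨bs, hbs⟩ := pvBounds_head rs
  rw [pvChunksB, pvChunksB, pvBounds_cons_id r rs h]
  rw [hbs]
  simp only [List.map_cons, List.tail_cons, List.zip_cons_cons, List.map_cons]
  congr 1
  · -- first chunk
    have hl : (0:Int) ≤ ((rs.takeWhile (fun x => !pvIsID x)).length : Int) := by positivity
    rw [PySem.List.slice_toNat _ (by omega) (by omega)]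
    simp only [Int.toNat_zero, List.drop_zero, Nat.sub_zero]
    have : (((rs.takeWhile (fun x => !pvIsID x)).length : Int) + 1).toNat
        = (rs.takeWhile (fun x => !pvIsID x)).length + 1 := by omega
    rw [this, List.take_succ_cons]
    rw [pvTake_takeWhile]
  · -- remaining chunks
    have := pvZipTail_map (((rs.takeWhile (fun x => !pvIsID x)).length : Int) :: bs) (· + 1)
    simp only [List.map_cons, List.tail_cons] at this
    rw [this, List.map_map, ← hbs]
    apply List.map_congr_left
    intro be hbe
    have h1 : be.1 ∈ pvBounds rs := (List.of_mem_zip (by rw [hbs] at hbe ⊢; exact hbe)).1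
    have h2 : be.2 ∈ (pvBounds rs).tail := (List.of_mem_zip (by rw [hbs] at hbe ⊢; exact hbe)).2
    have hb1 := pvBounds_nonneg rs be.1 h1
    have hb2 := pvBounds_nonneg rs be.2 (List.mem_of_mem_tail h2)
    simp [Function.comp, pvSlice_succ r rs be.1 be.2 hb1 hb2]

def pvStep (d : PySem.Dict String String) (r : List String) : PySem.Dict String String :=
  PySem.Dict.insert d (r.headD "") (PySem.Str.strip (r.getD 1 ""))


def pvBD (rows : List (List String)) : List (PySem.Dict String String) :=
  (pvChunksB rows).map pvBChunk


def pvConsume : List (List String) → PySem.Dict String String → List (PySem.Dict String String)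
  | [], cur => [cur]
  | r :: rs, cur =>
      if pvIsID r then cur :: pvConsume rs (pvStep PySem.Dict.empty r) else pvConsume rs (pvStep cur r)

theorem pvBD_cons_not (r : List String) (rs : List (List String)) (h : pvIsID r = false) :
    pvBD (r :: rs) = pvBD rs := by
  rw [pvBD, pvChunksB_cons_not r rs h]
  rfl

theorem pvBD_cons_id (r : List String) (rs : List (List String)) (h : pvIsID r = true) :
    pvBD (r :: rs) = pvBChunk (r :: rs.takeWhile (fun x => !pvIsID x)) :: pvBD rs := by
  rw [pvBD, pvChunksB_cons_id r rs h]
  rfl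

theorem pvAGo_started (rs : List (List String)) :
    ∀ (disks : List (PySem.Dict String String)) cur,
      pvAGo rs disks cur true = disks ++ pvConsume rs cur := by
  induction rs with
  | nil => intro disks cur; simp [pvAGo, pvConsume]
  | cons r rs ih =>
      intro disks cur
      by_cases h : pvIsID r
      · have hh : (r.headD "" == "ID") = true := h
        simp only [pvAGo, pvConsume, hh, h, if_pos]
        rw [ih]
        simp [pvStep]
      · have hh : (r.headD "" == "ID") = false := by simpa [pvIsID] using h
        simp only [pvAGo, pvConsume, hh, h]
        simp only [Bool.false_eq_true, if_false]
        rw [ih]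
        simp [pvStep]

theorem pvBD_dropWhile (rs : List (List String)) :
    pvBD rs = pvBD (rs.dropWhile (fun x => !pvIsID x)) := by
  induction rs with
  | nil => rfl
  | cons r rs ih =>
      by_cases h : pvIsID r
      · simp [h]
      · rw [pvBD_cons_not r rs (by simpa using h)]
        simp [h, ih]

theorem pvConsume_eq (rs : List (List String)) :
    ∀ cur, pvConsume rs cur
      = (rs.takeWhile (fun x => !pvIsID x)).foldl pvStep cur :: pvBD (rs.dropWhile (fun x => !pvIsID x)) := by
  induction rs with
  | nil => intro cur; simp [pvConsume, pvBD, pvChunksB_nil]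
  | cons r rs ih =>
      intro cur
      by_cases h : pvIsID r
      · simp only [pvConsume, h, if_true, List.takeWhile_cons, List.dropWhile_cons]
        simp only [Bool.not_true, Bool.false_eq_true, if_false, List.foldl_nil]
        congr 1
        rw [ih, pvBD_cons_id r rs h]
        congr 1
        exact (pvBD_dropWhile rs).symm
      · have hb : pvIsID r = false := by simpa using h
        simp only [pvConsume, hb, Bool.false_eq_true, if_false, List.takeWhile_cons,
          List.dropWhile_cons]
        simp only [Bool.not_false, if_true, List.foldl_cons]
        exact ih (pvStep cur r)

theorem pvAGo_eq_BD (rows : List (List String)) :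
    ∀ cur, pvAGo rows [] cur false = pvBD rows := by
  induction rows with
  | nil => intro cur; simp [pvAGo, pvBD, pvChunksB_nil]
  | cons r rs ih =>
      intro cur
      by_cases h : pvIsID r
      · have hh : (r.headD "" == "ID") = true := h
        simp only [pvAGo, hh, if_true, Bool.false_eq_true, if_false]
        rw [pvAGo_started, List.nil_append, pvConsume_eq, pvBD_cons_id r rs h]
        congr 1
        exact (pvBD_dropWhile rs).symm
      · have hh : (r.headD "" == "ID") = false := by simpa [pvIsID] using h
        simp only [pvAGo, hh, Bool.false_eq_true, if_false]
        rw [ih, pvBD_cons_not r rs (by simpa using h)]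

theorem pvBD_eq_alt (rows : List (List String)) :
    parse_rstcli_disks_alt rows = (pvBD rows).map (·.items) := by
  simp [parse_rstcli_disks_alt, pvBD, pvChunksB, List.map_map, Function.comp]

-- ===== VERDICT (by name: the statement is the Claim_ definition above) =====
theorem parse_rstcli_disks_spec : Claim_equal_parse_rstcli_disks := by
  intro rows _hdom _hpre
  unfold Spec_parse_rstcli_disks parse_rstcli_disks
  rw [pvAGo_eq_BD rows PySem.Dict.empty, pvBD_eq_alt]
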